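-- pv_equiv track=rewrite | github.com/gangsnapao/Ai-Novel | backend/app/api/routes/outline_route_chapter_helpers.py | _format_chapter_number_ranges
-- ===== SOURCE A (Python) =====
-- def _format_chapter_number_ranges(numbers: list[int]) -> str:
--     if not numbers:
--         return ""
--     nums = sorted(set(int(n) for n in numbers))
--     ranges: list[str] = []
--     start = prev = nums[0]
--     for n in nums[1:]:
--         if n == prev + 1:
--             prev = n
--             continue
--         ranges.append(f"{start}-{prev}" if start != prev else str(start))
--         start = prev = n
--     ranges.append(f"{start}-{prev}" if start != prev else str(start))
--     return ", ".join(ranges)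
-- ===== SOURCE B (Python) =====
-- def _format_chapter_number_ranges(numbers: list[int]) -> str:
--     if not numbers:
--         return ""
--     s = {int(n) for n in numbers}
--     nums = sorted(s)
--     starts = [n for n in nums if n - 1 not in s]
--     ends = [n for n in nums if n + 1 not in s]
--     return ", ".join(str(a) if a == b else f"{a}-{b}" for a, b in zip(starts, ends))
-- ===== Notes on version B (the rewrite author's own statement) =====
-- stated objective: alternative
-- what changed: Replaces A's sequential run-collapsing accumulator loop (start/prev state, flushing a pending piece on each break) by order-free set-membership boundary detection: run starts (n-1 not in the set) and run ends (n+1 not in the set) are selected by two independent filters over the sorted values and zipped positionally into the pieces.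
import Mathlib
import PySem

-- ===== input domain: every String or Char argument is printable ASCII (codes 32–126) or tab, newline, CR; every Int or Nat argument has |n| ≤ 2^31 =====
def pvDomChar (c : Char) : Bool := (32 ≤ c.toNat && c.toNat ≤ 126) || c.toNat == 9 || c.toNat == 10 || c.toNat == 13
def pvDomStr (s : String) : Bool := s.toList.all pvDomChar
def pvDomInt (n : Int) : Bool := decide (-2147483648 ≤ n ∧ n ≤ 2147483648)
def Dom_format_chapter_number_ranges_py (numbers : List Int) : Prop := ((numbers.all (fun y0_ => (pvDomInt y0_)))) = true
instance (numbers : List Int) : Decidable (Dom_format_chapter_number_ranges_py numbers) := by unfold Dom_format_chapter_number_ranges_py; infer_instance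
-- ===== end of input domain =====

-- B replaces A's sequential run-collapsing accumulator loop by set-membership boundary detection:
-- run starts (n-1 not in the set) and run ends (n+1 not in the set) are two independent filters
-- over the sorted values, zipped positionally into pieces (objective: alternative).

-- ===== PORT A =====
-- the piece 'f"{start}-{prev}" if start != prev else str(start)'
def pvPieceA (start prev : Int) : String :=
  if start ≠ prev then PySem.Int.toStr start ++ "-" ++ PySem.Int.toStr prev else PySem.Int.toStr start

-- the 'for n in nums[1:]' loop with state (ranges, start, prev), plus the trailing append
def pvLoopA (rest : List Int) (ranges : List String) (start prev : Int) : List String :=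
  match rest with
  | [] => ranges ++ [pvPieceA start prev]
  | n :: rest' =>
    if n = prev + 1 then pvLoopA rest' ranges start n
    else pvLoopA rest' (ranges ++ [pvPieceA start prev]) n n

def format_chapter_number_ranges_py (numbers : List Int) : String :=
  if numbers = [] then ""
  else
    match PySem.List.sorted (PySem.Set.ofList numbers) (fun x => x) false with  -- nums
    | [] => ""  -- unreachable: set of a nonempty list is nonempty (nums[0] cannot raise)
    | x :: rest => PySem.Str.join ", " (pvLoopA rest [] x x)

-- ===== PORT B =====
def format_chapter_number_ranges_py_alt (numbers : List Int) : String :=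
  if numbers = [] then ""
  else
    let s := PySem.Set.ofList numbers
    let nums := PySem.List.sorted s (fun x => x) false
    let starts := nums.filter (fun n => !(PySem.Set.contains s (n - 1)))
    let ends := nums.filter (fun n => !(PySem.Set.contains s (n + 1)))
    PySem.Str.join ", " ((starts.zip ends).map
      (fun p => if p.1 = p.2 then PySem.Int.toStr p.1
                else PySem.Int.toStr p.1 ++ "-" ++ PySem.Int.toStr p.2))

-- ===== PRECONDITION & SPEC =====
def Spec_format_chapter_number_ranges_py (numbers : List Int) (out : String) : Prop := out = format_chapter_number_ranges_py_alt numbers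
instance (numbers : List Int) (out : String) : Decidable (Spec_format_chapter_number_ranges_py numbers out) := by unfold Spec_format_chapter_number_ranges_py; infer_instance

-- ===== CLAIM (what is proved, stated in full; the proofs are below) =====
def Claim_equal_format_chapter_number_ranges_py : Prop := ∀ (numbers : List Int), Dom_format_chapter_number_ranges_py numbers → Spec_format_chapter_number_ranges_py numbers (format_chapter_number_ranges_py numbers)

-- ===== LEMMAS AND PROOFS =====

-- Common abstraction of A's loop: peel off the maximal leading consecutive run.
def pvSplitRun (prev : Int) : List Int → Int × List Int
  | [] => (prev, [])
  | y :: t => if y = prev + 1 then pvSplitRun y t else (prev, y :: t)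

theorem pvSplitRun_len (prev : Int) (l : List Int) : (pvSplitRun prev l).2.length ≤ l.length := by
  induction l generalizing prev with
  | nil => simp [pvSplitRun]
  | cons y t ih =>
    simp only [pvSplitRun]
    split
    · exact le_trans (ih _) (Nat.le_succ _)
    · simp

def pvRunsB (nums : List Int) : List String :=
  match nums with
  | [] => []
  | x :: rest =>
    let p := pvSplitRun x rest
    (if x = p.1 then PySem.Int.toStr x else PySem.Int.toStr x ++ "-" ++ PySem.Int.toStr p.1)
      :: pvRunsB p.2
termination_by nums.length
decreasing_by simpa using Nat.lt_succ_of_le (pvSplitRun_len x rest)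

theorem pvRunsB_cons (x : Int) (rest : List Int) :
    pvRunsB (x :: rest) = pvPieceA x (pvSplitRun x rest).1 :: pvRunsB (pvSplitRun x rest).2 := by
  rw [pvRunsB, pvPieceA]
  by_cases h : x = (pvSplitRun x rest).1
  · rw [if_pos h, if_neg (not_not_intro h)]
  · rw [if_neg h, if_pos h]

-- A's loop from state (ranges, start, prev) emits ranges, then the piece ending where the
-- current run ends, then the pieces of the remainder.
theorem pvLoopA_eq (rest : List Int) (ranges : List String) (start prev : Int) :
    pvLoopA rest ranges start prev =
      ranges ++ (pvPieceA start (pvSplitRun prev rest).1 :: pvRunsB (pvSplitRun prev rest).2) := by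
  induction rest generalizing ranges start prev with
  | nil => simp [pvLoopA, pvSplitRun, pvRunsB]
  | cons n rest' ih =>
    simp only [pvLoopA, pvSplitRun]
    split
    · exact ih ranges start n
    · rw [ih (ranges ++ [pvPieceA start prev]) n n, pvRunsB_cons]
      simp

-- Local forms of B's two filters on a strictly increasing list (prev is the element before rest).
def pvSAux (prev : Int) : List Int → List Int
  | [] => []
  | y :: t => if y = prev + 1 then pvSAux y t else y :: pvSAux y t

def pvEAux (prev : Int) : List Int → List Int
  | [] => [prev]
  | y :: t => if y = prev + 1 then pvEAux y t else prev :: pvEAux y t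

-- On a strictly increasing list, "n-1 ∈ list" holds exactly for elements adjacent to their
-- predecessor, so the starts filter reduces to the local scan pvSAux.
theorem pvFilter_starts (rest : List Int) (prev : Int)
    (hp : (prev :: rest).Pairwise (· < ·)) :
    rest.filter (fun n => !(decide ((n - 1) ∈ prev :: rest))) = pvSAux prev rest := by
  induction rest generalizing prev with
  | nil => rfl
  | cons y t ih =>
    have hpy : prev < y := (List.pairwise_cons.mp hp).1 y (by simp)
    have hyt : (y :: t).Pairwise (· < ·) := (List.pairwise_cons.mp hp).2
    have hty : ∀ m ∈ t, y < m := (List.pairwise_cons.mp hyt).1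
    have hmem : ((y - 1) ∈ prev :: y :: t) ↔ y = prev + 1 := by
      simp only [List.mem_cons]
      constructor
      · rintro (hc | hc | hc)
        · omega
        · omega
        · have := hty _ hc; omega
      · intro hc; left; omega
    have htail : t.filter (fun n => !(decide ((n - 1) ∈ prev :: y :: t))) =
        t.filter (fun n => !(decide ((n - 1) ∈ y :: t))) := by
      apply List.filter_congr
      intro n hn
      have hny : y < n := hty n hn
      have hiff : ((n - 1) ∈ prev :: y :: t) ↔ ((n - 1) ∈ y :: t) := by
        simp only [List.mem_cons]
        constructor
        · rintro (hc | hc)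
          · omega
          · exact hc
        · intro hc; right; exact hc
      simp [hiff]
    rw [List.filter_cons, htail, ih y hyt, pvSAux]
    by_cases h : y = prev + 1
    · rw [if_pos h]
      have hin : ((y - 1) ∈ prev :: y :: t) := hmem.mpr h
      simp [hin]
    · rw [if_neg h]
      have hnin : ¬ ((y - 1) ∈ prev :: y :: t) := fun hc => h (hmem.mp hc)
      simp [hnin]

-- Likewise "n+1 ∈ list" holds exactly for elements adjacent to their successor, so the ends
-- filter reduces to pvEAux.
theorem pvFilter_ends (rest : List Int) (prev : Int)
    (hp : (prev :: rest).Pairwise (· < ·)) :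
    (prev :: rest).filter (fun n => !(decide ((n + 1) ∈ prev :: rest))) = pvEAux prev rest := by
  induction rest generalizing prev with
  | nil =>
    have hnin : ¬ ((prev + 1) ∈ [prev]) := by
      simp only [List.mem_cons, List.not_mem_nil, or_false]; omega
    simp [pvEAux]
  | cons y t ih =>
    have hpy : prev < y := (List.pairwise_cons.mp hp).1 y (by simp)
    have hyt : (y :: t).Pairwise (· < ·) := (List.pairwise_cons.mp hp).2
    have hty : ∀ m ∈ t, y < m := (List.pairwise_cons.mp hyt).1
    have hmem : ((prev + 1) ∈ prev :: y :: t) ↔ y = prev + 1 := by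
      simp only [List.mem_cons]
      constructor
      · rintro (hc | hc | hc)
        · omega
        · omega
        · have := hty _ hc; omega
      · intro hc; right; left; omega
    have htail : (y :: t).filter (fun n => !(decide ((n + 1) ∈ prev :: y :: t))) =
        (y :: t).filter (fun n => !(decide ((n + 1) ∈ y :: t))) := by
      apply List.filter_congr
      intro n hn
      have hny : y ≤ n := by
        simp only [List.mem_cons] at hn
        rcases hn with hn | hn
        · omega
        · have := hty _ hn; omega
      have hiff : ((n + 1) ∈ prev :: y :: t) ↔ ((n + 1) ∈ y :: t) := by
        simp only [List.mem_cons]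
        constructor
        · rintro (hc | hc)
          · omega
          · exact hc
        · intro hc; right; exact hc
      simp [hiff]
    rw [List.filter_cons, htail, ih y hyt, pvEAux]
    by_cases h : y = prev + 1
    · rw [if_pos h]
      have hin : ((prev + 1) ∈ prev :: y :: t) := hmem.mpr h
      simp [hin]
    · rw [if_neg h]
      have hnin : ¬ ((prev + 1) ∈ prev :: y :: t) := fun hc => h (hmem.mp hc)
      simp [hnin]

def pvPieceB (p : Int × Int) : String :=
  if p.1 = p.2 then PySem.Int.toStr p.1 else PySem.Int.toStr p.1 ++ "-" ++ PySem.Int.toStr p.2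

theorem pvPieceB_eq (a b : Int) : pvPieceB (a, b) = pvPieceA a b := by
  unfold pvPieceB pvPieceA
  by_cases h : a = b
  · rw [if_pos h, if_neg (not_not_intro h)]
  · rw [if_neg h, if_pos h]

-- Zipping the local starts/ends scans reproduces A's run pieces (purely structural).
theorem pvZip_eq (rest : List Int) (start prev : Int) :
    ((start :: pvSAux prev rest).zip (pvEAux prev rest)).map pvPieceB =
      pvPieceA start (pvSplitRun prev rest).1 :: pvRunsB (pvSplitRun prev rest).2 := by
  induction rest generalizing start prev with
  | nil => simp [pvSAux, pvEAux, pvSplitRun, pvRunsB, pvPieceB_eq]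
  | cons y t ih =>
    simp only [pvSAux, pvEAux, pvSplitRun]
    by_cases h : y = prev + 1
    · rw [if_pos h, if_pos h, if_pos h]
      exact ih start y
    · rw [if_neg h, if_neg h, if_neg h]
      show pvPieceB (start, prev) :: ((y :: pvSAux y t).zip (pvEAux y t)).map pvPieceB = _
      rw [pvPieceB_eq, ih y y, pvRunsB_cons]

-- ===== VERDICT (by name: the statement is the Claim_ definition above) =====
theorem format_chapter_number_ranges_py_spec : Claim_equal_format_chapter_number_ranges_py := by
  intro numbers _
  unfold Spec_format_chapter_number_ranges_py format_chapter_number_ranges_py format_chapter_number_ranges_py_alt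
  dsimp only
  split
  · rfl
  · cases h : PySem.List.sorted (PySem.Set.ofList numbers) (fun x => x) false with
    | nil => simp [PySem.Str.join]
    | cons x rest =>
      have hlt : (x :: rest).Pairwise (· < ·) := by
        rw [← h]; exact PySem.List.sorted_ofList_pairwise_lt numbers
      have hxmin : ∀ m ∈ rest, x < m := (List.pairwise_cons.mp hlt).1
      have hmemconv : ∀ (m : Int), (PySem.Set.contains (PySem.Set.ofList numbers) m) =
          decide (m ∈ x :: rest) := by
        intro m
        have hiff : m ∈ PySem.Set.ofList numbers ↔ m ∈ x :: rest := by
          rw [← h]; exact (PySem.List.mem_sorted _ _ _ _).symm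
        rw [Bool.eq_iff_iff]
        simp [hiff]
      have hs : (x :: rest).filter
            (fun n => !(PySem.Set.contains (PySem.Set.ofList numbers) (n - 1))) =
          x :: pvSAux x rest := by
        rw [List.filter_congr (fun n _ => by rw [hmemconv (n - 1)])]
        have hnin : ¬ ((x - 1) ∈ x :: rest) := by
          simp only [List.mem_cons]
          rintro (hc | hc)
          · omega
          · have := hxmin _ hc; omega
        rw [List.filter_cons]
        simp only [hnin, decide_false, Bool.not_false, if_pos]
        rw [pvFilter_starts rest x hlt]
      have he : (x :: rest).filter
            (fun n => !(PySem.Set.contains (PySem.Set.ofList numbers) (n + 1))) =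
          pvEAux x rest := by
        rw [List.filter_congr (fun n _ => by rw [hmemconv (n + 1)])]
        exact pvFilter_ends rest x hlt
      show PySem.Str.join ", " (pvLoopA rest [] x x) = _
      rw [pvLoopA_eq, hs, he, List.nil_append]
      have hz := pvZip_eq rest x x
      unfold pvPieceB at hz
      rw [← hz]
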